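-- pv_equiv track=rewrite | github.com/MonsterDush/AASFC | backend/app/scripts/backfill_position_permission_codes.py | _derive_legacy_flags_from_codes
-- ===== SOURCE A (Python) =====
-- def _derive_legacy_flags_from_codes(codes: list[str]) -> dict[str, bool]:
--     s = {str(c or "").strip().upper() for c in (codes or [])}
--     s.discard("")
--     return {
--         "can_make_reports": bool(s.intersection({"SHIFT_REPORT_CLOSE", "SHIFT_REPORT_EDIT"})),
--         "can_view_reports": bool(s.intersection({"SHIFT_REPORT_VIEW", "SHIFT_REPORT_CLOSE", "SHIFT_REPORT_EDIT", "SHIFT_REPORT_REOPEN"})),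
--         "can_view_revenue": bool(s.intersection({"SHIFT_REPORT_VIEW", "SHIFT_REPORT_CLOSE", "SHIFT_REPORT_EDIT"})),
--         "can_edit_schedule": bool(s.intersection({"SHIFTS_MANAGE"})),
--         "can_view_adjustments": bool(s.intersection({"ADJUSTMENTS_VIEW", "ADJUSTMENTS_MANAGE"})),
--         "can_manage_adjustments": bool(s.intersection({"ADJUSTMENTS_MANAGE"})),
--         "can_resolve_disputes": bool(s.intersection({"DISPUTES_RESOLVE"})),
--     }
-- ===== SOURCE B (Python) =====
-- def _derive_legacy_flags_from_codes(codes: list[str]) -> dict[str, bool]: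
--     # One pass over the codes, accumulating the seven flags directly; no sets.
--     make = view_rep = view_rev = sched = view_adj = man_adj = disputes = False
--     for c in (codes or []):
--         code = str(c or "").strip().upper()
--         if code == "SHIFT_REPORT_CLOSE" or code == "SHIFT_REPORT_EDIT":
--             make = view_rep = view_rev = True
--         elif code == "SHIFT_REPORT_VIEW":
--             view_rep = view_rev = True
--         elif code == "SHIFT_REPORT_REOPEN":
--             view_rep = True
--         elif code == "SHIFTS_MANAGE":
--             sched = True
--         elif code == "ADJUSTMENTS_VIEW":
--             view_adj = True
--         elif code == "ADJUSTMENTS_MANAGE":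
--             view_adj = man_adj = True
--         elif code == "DISPUTES_RESOLVE":
--             disputes = True
--     return {
--         "can_make_reports": make,
--         "can_view_reports": view_rep,
--         "can_view_revenue": view_rev,
--         "can_edit_schedule": sched,
--         "can_view_adjustments": view_adj,
--         "can_manage_adjustments": man_adj,
--         "can_resolve_disputes": disputes,
--     }
-- ===== Notes on version B (the rewrite author's own statement) =====
-- stated objective: simpler
-- what changed: A builds a deduplicated set of normalized codes and tests seven set intersections (rule-first traversal); B makes a single pass over the codes, dispatching each normalized code through one elif chain that sets the boolean flags directly (code-first traversal, no sets, no intersections).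
import Mathlib
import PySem

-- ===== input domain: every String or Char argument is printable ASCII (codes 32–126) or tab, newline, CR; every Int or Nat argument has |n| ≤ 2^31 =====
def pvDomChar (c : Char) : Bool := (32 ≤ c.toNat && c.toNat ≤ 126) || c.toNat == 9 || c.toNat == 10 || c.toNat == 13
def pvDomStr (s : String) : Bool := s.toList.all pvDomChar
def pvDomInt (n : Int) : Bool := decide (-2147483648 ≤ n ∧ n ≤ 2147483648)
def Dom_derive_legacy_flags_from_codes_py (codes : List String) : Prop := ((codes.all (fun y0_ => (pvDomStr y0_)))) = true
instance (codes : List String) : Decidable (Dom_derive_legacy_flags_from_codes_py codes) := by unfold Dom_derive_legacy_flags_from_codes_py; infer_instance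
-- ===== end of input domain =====

-- B replaces A's set-comprehension + per-flag set intersections by a single pass over the
-- codes that accumulates the seven boolean flags directly (objective: simpler).

-- ===== PORT A =====
-- str(c or "").strip().upper()
def pvNorm (c : String) : String :=
  PySem.Str.upper (PySem.Str.strip (if c = "" then "" else c))

def derive_legacy_flags_from_codes_py (codes : List String) : List (String × Bool) :=
  let s0 : PySem.Set String := PySem.Set.ofList (codes.map pvNorm)
  let s : PySem.Set String := PySem.Set.discard s0 ""
  [ ("can_make_reports", !(PySem.Set.inter s ["SHIFT_REPORT_CLOSE", "SHIFT_REPORT_EDIT"]).isEmpty),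
    ("can_view_reports", !(PySem.Set.inter s ["SHIFT_REPORT_VIEW", "SHIFT_REPORT_CLOSE", "SHIFT_REPORT_EDIT", "SHIFT_REPORT_REOPEN"]).isEmpty),
    ("can_view_revenue", !(PySem.Set.inter s ["SHIFT_REPORT_VIEW", "SHIFT_REPORT_CLOSE", "SHIFT_REPORT_EDIT"]).isEmpty),
    ("can_edit_schedule", !(PySem.Set.inter s ["SHIFTS_MANAGE"]).isEmpty),
    ("can_view_adjustments", !(PySem.Set.inter s ["ADJUSTMENTS_VIEW", "ADJUSTMENTS_MANAGE"]).isEmpty),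
    ("can_manage_adjustments", !(PySem.Set.inter s ["ADJUSTMENTS_MANAGE"]).isEmpty),
    ("can_resolve_disputes", !(PySem.Set.inter s ["DISPUTES_RESOLVE"]).isEmpty) ]

-- ===== PORT B =====
-- the body of B's for-loop: the elif chain on the normalized code
def pvStepB (st : Bool × Bool × Bool × Bool × Bool × Bool × Bool) (c : String) :
    Bool × Bool × Bool × Bool × Bool × Bool × Bool :=
  let code := pvNorm c
  let (make, view_rep, view_rev, sched, view_adj, man_adj, disputes) := st
  if code = "SHIFT_REPORT_CLOSE" ∨ code = "SHIFT_REPORT_EDIT" then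
    (true, true, true, sched, view_adj, man_adj, disputes)
  else if code = "SHIFT_REPORT_VIEW" then
    (make, true, true, sched, view_adj, man_adj, disputes)
  else if code = "SHIFT_REPORT_REOPEN" then
    (make, true, view_rev, sched, view_adj, man_adj, disputes)
  else if code = "SHIFTS_MANAGE" then
    (make, view_rep, view_rev, true, view_adj, man_adj, disputes)
  else if code = "ADJUSTMENTS_VIEW" then
    (make, view_rep, view_rev, sched, true, man_adj, disputes)
  else if code = "ADJUSTMENTS_MANAGE" then
    (make, view_rep, view_rev, sched, true, true, disputes)
  else if code = "DISPUTES_RESOLVE" then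
    (make, view_rep, view_rev, sched, view_adj, man_adj, true)
  else
    (make, view_rep, view_rev, sched, view_adj, man_adj, disputes)

def derive_legacy_flags_from_codes_py_alt (codes : List String) : List (String × Bool) :=
  let (make, view_rep, view_rev, sched, view_adj, man_adj, disputes) :=
    codes.foldl pvStepB (false, false, false, false, false, false, false)
  [ ("can_make_reports", make),
    ("can_view_reports", view_rep),
    ("can_view_revenue", view_rev),
    ("can_edit_schedule", sched),
    ("can_view_adjustments", view_adj),
    ("can_manage_adjustments", man_adj),
    ("can_resolve_disputes", disputes) ]

-- ===== PRECONDITION & SPEC =====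
def Spec_derive_legacy_flags_from_codes_py (codes : List String) (out : List (String × Bool)) : Prop := out = derive_legacy_flags_from_codes_py_alt codes
instance (codes : List String) (out : List (String × Bool)) : Decidable (Spec_derive_legacy_flags_from_codes_py codes out) := by unfold Spec_derive_legacy_flags_from_codes_py; infer_instance

-- ===== CLAIM (what is proved, stated in full; the proofs are below) =====
def Claim_equal_derive_legacy_flags_from_codes_py : Prop := ∀ (codes : List String), Dom_derive_legacy_flags_from_codes_py codes → Spec_derive_legacy_flags_from_codes_py codes (derive_legacy_flags_from_codes_py codes)

-- ===== LEMMAS AND PROOFS =====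

-- A's per-flag boolean: the (discarded, deduplicated) set meets the rule set iff some code normalizes into it
theorem pvA_flag (codes : List String) (t : List String) (ht : "" ∉ t) :
    (!(PySem.Set.inter (PySem.Set.discard (PySem.Set.ofList (codes.map pvNorm)) "") t).isEmpty)
      = codes.any (fun c => decide (pvNorm c ∈ t)) := by
  rw [Bool.eq_iff_iff]
  simp only [Bool.not_eq_eq_eq_not, Bool.not_true, List.isEmpty_eq_false_iff_exists_mem,
    List.any_eq_true, PySem.Set.mem_inter, PySem.Set.mem_discard, PySem.Set.mem_ofList,
    List.mem_map, decide_eq_true_eq]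
  constructor
  · rintro ⟨x, ⟨⟨c, hc, rfl⟩, -⟩, hxt⟩
    exact ⟨c, hc, hxt⟩
  · rintro ⟨c, hc, hmem⟩
    exact ⟨pvNorm c, ⟨⟨c, hc, rfl⟩, fun h => ht (h ▸ hmem)⟩, hmem⟩

-- one step of B's loop, componentwise: old flag OR "this code grants it"
theorem pvStepB_apply (c : String) (m vr vv es va ma rd : Bool) :
    pvStepB (m, vr, vv, es, va, ma, rd) c =
      ( m || decide (pvNorm c ∈ (["SHIFT_REPORT_CLOSE", "SHIFT_REPORT_EDIT"] : List String)),
        vr || decide (pvNorm c ∈ (["SHIFT_REPORT_VIEW", "SHIFT_REPORT_CLOSE", "SHIFT_REPORT_EDIT", "SHIFT_REPORT_REOPEN"] : List String)),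
        vv || decide (pvNorm c ∈ (["SHIFT_REPORT_VIEW", "SHIFT_REPORT_CLOSE", "SHIFT_REPORT_EDIT"] : List String)),
        es || decide (pvNorm c ∈ (["SHIFTS_MANAGE"] : List String)),
        va || decide (pvNorm c ∈ (["ADJUSTMENTS_VIEW", "ADJUSTMENTS_MANAGE"] : List String)),
        ma || decide (pvNorm c ∈ (["ADJUSTMENTS_MANAGE"] : List String)),
        rd || decide (pvNorm c ∈ (["DISPUTES_RESOLVE"] : List String)) ) := by
  simp only [pvStepB]
  split_ifs with h1 h2 h3 h4 h5 h6 h7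
  · rcases h1 with h | h <;> simp_all
  · simp_all
  · simp_all
  · simp_all
  · simp_all
  · simp_all
  · simp_all
  · push Not at h1
    simp_all

-- B's fold computes, componentwise, "initial value OR some code matches"
theorem pvB_fold (codes : List String) (m vr vv es va ma rd : Bool) :
    codes.foldl pvStepB (m, vr, vv, es, va, ma, rd) =
      ( m || codes.any (fun c => decide (pvNorm c ∈ (["SHIFT_REPORT_CLOSE", "SHIFT_REPORT_EDIT"] : List String))),
        vr || codes.any (fun c => decide (pvNorm c ∈ (["SHIFT_REPORT_VIEW", "SHIFT_REPORT_CLOSE", "SHIFT_REPORT_EDIT", "SHIFT_REPORT_REOPEN"] : List String))),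
        vv || codes.any (fun c => decide (pvNorm c ∈ (["SHIFT_REPORT_VIEW", "SHIFT_REPORT_CLOSE", "SHIFT_REPORT_EDIT"] : List String))),
        es || codes.any (fun c => decide (pvNorm c ∈ (["SHIFTS_MANAGE"] : List String))),
        va || codes.any (fun c => decide (pvNorm c ∈ (["ADJUSTMENTS_VIEW", "ADJUSTMENTS_MANAGE"] : List String))),
        ma || codes.any (fun c => decide (pvNorm c ∈ (["ADJUSTMENTS_MANAGE"] : List String))),
        rd || codes.any (fun c => decide (pvNorm c ∈ (["DISPUTES_RESOLVE"] : List String))) ) := by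
  induction codes generalizing m vr vv es va ma rd with
  | nil => simp
  | cons c cs ih =>
    simp only [List.foldl_cons, List.any_cons, pvStepB_apply, ih, Bool.or_assoc]

-- ===== VERDICT (by name: the statement is the Claim_ definition above) =====
theorem derive_legacy_flags_from_codes_py_spec : Claim_equal_derive_legacy_flags_from_codes_py := by
  intro codes _
  unfold Spec_derive_legacy_flags_from_codes_py derive_legacy_flags_from_codes_py
    derive_legacy_flags_from_codes_py_alt
  rw [pvB_fold]
  simp only [Bool.false_or]
  rw [pvA_flag codes ["SHIFT_REPORT_CLOSE", "SHIFT_REPORT_EDIT"] (by decide),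
    pvA_flag codes ["SHIFT_REPORT_VIEW", "SHIFT_REPORT_CLOSE", "SHIFT_REPORT_EDIT", "SHIFT_REPORT_REOPEN"] (by decide),
    pvA_flag codes ["SHIFT_REPORT_VIEW", "SHIFT_REPORT_CLOSE", "SHIFT_REPORT_EDIT"] (by decide),
    pvA_flag codes ["SHIFTS_MANAGE"] (by decide),
    pvA_flag codes ["ADJUSTMENTS_VIEW", "ADJUSTMENTS_MANAGE"] (by decide),
    pvA_flag codes ["ADJUSTMENTS_MANAGE"] (by decide),
    pvA_flag codes ["DISPUTES_RESOLVE"] (by decide)]
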